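-- pv_equiv track=rewrite | github.com/emi-lex/methylation_jb | tests/utils/preprocess.py | get_chromosome_coords
-- ===== SOURCE A (Python) =====
-- def get_chromosome_coords(chromosomes_arr): # tested
--     i = 0
--     n = len(chromosomes_arr)
--     chromosome_coords = {}
--     while i < n:
--         start = i
--         chr = chromosomes_arr[i]
--         while i < n and chromosomes_arr[i] == chr:
--             i += 1
--         end = i
--         chromosome_coords[chr] = (start, end)
--     return chromosome_coords
-- ===== SOURCE B (Python) =====
-- def get_chromosome_coords(chromosomes_arr):
--     n = len(chromosomes_arr)
--     if n == 0:
--         return {}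
--     # pass 1: run boundaries (index 0 plus every index where the value changes)
--     starts = [0] + [i for i in range(1, n)
--                     if chromosomes_arr[i] != chromosomes_arr[i - 1]]
--     ends = starts[1:] + [n]
--     # pass 2: one dict entry per run; later runs of a repeated chromosome overwrite
--     return {chromosomes_arr[s]: (s, e) for s, e in zip(starts, ends)}
-- ===== Notes on version B (the rewrite author's own statement) =====
-- stated objective: alternative
-- what changed: A's nested while loops that scan each run in place are replaced by two flat passes: first a boundary table (run-start indices via a comprehension over range(1,n) plus a terminal sentinel n), then a dict comprehension over zip(starts, ends) that assigns one entry per run.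
import Mathlib
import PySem

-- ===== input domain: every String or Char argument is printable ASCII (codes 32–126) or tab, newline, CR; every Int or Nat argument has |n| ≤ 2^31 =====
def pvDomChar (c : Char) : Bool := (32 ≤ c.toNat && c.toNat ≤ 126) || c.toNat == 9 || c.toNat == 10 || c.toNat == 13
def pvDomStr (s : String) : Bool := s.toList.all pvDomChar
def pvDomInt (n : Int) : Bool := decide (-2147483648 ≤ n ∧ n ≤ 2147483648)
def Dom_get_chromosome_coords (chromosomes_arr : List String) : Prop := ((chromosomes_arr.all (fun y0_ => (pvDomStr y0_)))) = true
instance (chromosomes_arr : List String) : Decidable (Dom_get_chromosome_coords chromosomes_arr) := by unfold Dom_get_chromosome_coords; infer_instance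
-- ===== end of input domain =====

-- A's nested while-loops scanning runs in place vs B's two flat passes (boundary table, then one
-- dict entry per run); both return the same dict, proved via a common run decomposition.


-- ===== PORT A =====
-- inner `while i < n and chromosomes_arr[i] == chr: i += 1`
def pvInnerA (g : List String) (chr : String) (i : Int) : Int :=
  if _h : i < PySem.List.len g then
    match PySem.List.pyGet? g i with
    | some v => if v == chr then pvInnerA g chr (i + 1) else i
    | none => i
  else i
termination_by (PySem.List.len g - i).toNat
decreasing_by simp only [PySem.List.len_eq] at *; omega

-- outer `while i < n: …` (fuel = len suffices: every iteration advances i by at least one run)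
def pvOuterA (g : List String) : Nat → Int → PySem.Dict String (Int × Int) → PySem.Dict String (Int × Int)
  | 0, _, d => d
  | fuel + 1, i, d =>
    if i < PySem.List.len g then
      let start := i
      let chr := match PySem.List.pyGet? g i with | some v => v | none => ""
      let j := pvInnerA g chr i
      pvOuterA g fuel j (d.insert chr (start, j))
    else d

def get_chromosome_coords (chromosomes_arr : List String) : List (String × Int × Int) :=
  (pvOuterA chromosomes_arr chromosomes_arr.length 0 PySem.Dict.empty).items

-- ===== PORT B =====
def get_chromosome_coords_alt (chromosomes_arr : List String) : List (String × Int × Int) :=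
  let n := PySem.List.len chromosomes_arr
  if n == 0 then []
  else
    let starts : List Int := 0 :: ((PySem.List.pyRange 1 n 1).filter
        (fun i => PySem.List.pyGet? chromosomes_arr i != PySem.List.pyGet? chromosomes_arr (i - 1)))
    let ends : List Int := PySem.List.slice starts (some 1) none ++ [n]
    ((starts.zip ends).foldl
        (fun d se =>
          match PySem.List.pyGet? chromosomes_arr se.1 with
          | some c => d.insert c se
          | none => d)
        PySem.Dict.empty).items

-- ===== PRECONDITION & SPEC =====
def Spec_get_chromosome_coords (chromosomes_arr : List String) (out : List (String × Int × Int)) : Prop := out = get_chromosome_coords_alt chromosomes_arr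
instance (chromosomes_arr : List String) (out : List (String × Int × Int)) : Decidable (Spec_get_chromosome_coords chromosomes_arr out) := by unfold Spec_get_chromosome_coords; infer_instance

-- ===== CLAIM (what is proved, stated in full; the proofs are below) =====
def Claim_equal_get_chromosome_coords : Prop := ∀ (chromosomes_arr : List String), Dom_get_chromosome_coords chromosomes_arr → Spec_get_chromosome_coords chromosomes_arr (get_chromosome_coords chromosomes_arr)

-- ===== LEMMAS AND PROOFS =====

-- the list of runs of g, as (chromosome, start, end), starting at offset `off`
def pvRuns : List String → Int → List (String × Int × Int)
  | [], _ => []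
  | x :: xs, off =>
    let t := (xs.takeWhile (fun y => y == x)).length
    (x, off, off + (t : Int) + 1) :: pvRuns (xs.drop t) (off + (t : Int) + 1)
termination_by l _ => l.length
decreasing_by
  simp [List.length_drop]

def pvIns (d : PySem.Dict String (Int × Int)) (p : String × Int × Int) : PySem.Dict String (Int × Int) :=
  d.insert p.1 p.2

def pvStepB (g : List String) (d : PySem.Dict String (Int × Int)) (se : Int × Int) :
    PySem.Dict String (Int × Int) :=
  match PySem.List.pyGet? g se.1 with
  | some c => d.insert c se
  | none => d

def pvStarts (g : List String) : List Int :=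
  0 :: ((PySem.List.pyRange 1 (PySem.List.len g) 1).filter
    (fun i => PySem.List.pyGet? g i != PySem.List.pyGet? g (i - 1)))

def pvZipB (g : List String) : List (Int × Int) :=
  (pvStarts g).zip ((PySem.List.slice (pvStarts g) (some 1) none) ++ [PySem.List.len g])

lemma alt_eq_fold (g : List String) :
    get_chromosome_coords_alt g = ((pvZipB g).foldl (pvStepB g) PySem.Dict.empty).items := by
  cases g with
  | nil => rfl
  | cons x xs =>
    show get_chromosome_coords_alt (x :: xs) = _
    unfold get_chromosome_coords_alt pvZipB pvStarts pvStepB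
    simp only [PySem.List.len_eq]
    rw [if_neg (by simp; omega)]

lemma pyGet?_drop {α : Type} (l : List α) (k : Nat) (i : Int) (hi : 0 ≤ i) :
    PySem.List.pyGet? (l.drop k) i = PySem.List.pyGet? l (i + k) := by
  rw [PySem.List.pyGet?_of_nonneg _ hi, PySem.List.pyGet?_of_nonneg _ (by omega : (0:Int) ≤ i + k),
    List.getElem?_drop]
  congr 1
  omega

lemma pvInnerA_eq (g : List String) (chr : String) (i : Nat) :
    pvInnerA g chr i = (i : Int) + ((g.drop i).takeWhile (fun y => y == chr)).length := by
  rw [pvInnerA]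
  by_cases hlt : i < g.length
  · have hd : g.drop i = g[i] :: g.drop (i + 1) := List.drop_eq_getElem_cons hlt
    have hget : PySem.List.pyGet? g (i : Int) = some g[i] := by
      simp [List.getElem?_eq_getElem hlt]
    rw [dif_pos (by simp only [PySem.List.len_eq]; exact_mod_cast hlt), hget, hd]
    dsimp only
    by_cases he : (g[i] == chr) = true
    · rw [if_pos he]
      have ih := pvInnerA_eq g chr (i + 1)
      rw [show (i : Int) + 1 = ((i + 1 : Nat) : Int) by push_cast; ring, ih,
        List.takeWhile_cons_of_pos (p := fun y => y == chr) he]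
      simp only [List.length_cons]
      push_cast
      ring
    · rw [if_neg he, List.takeWhile_cons_of_neg (p := fun y => y == chr) (by simp [he])]
      simp
  · have hnil : g.drop i = [] := List.drop_eq_nil_of_le (by omega)
    rw [dif_neg (by simp only [PySem.List.len_eq]; exact_mod_cast hlt), hnil]
    simp
termination_by g.length - i

lemma pvOuterA_eq (g : List String) (fuel : Nat) :
    ∀ (i : Nat) (d : PySem.Dict String (Int × Int)), g.length - i ≤ fuel → i ≤ g.length →
    pvOuterA g fuel i d = (pvRuns (g.drop i) i).foldl pvIns d := by
  induction fuel with
  | zero =>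
    intro i d h1 h2
    have hi : i = g.length := by omega
    subst hi
    simp [pvOuterA, List.drop_length, pvRuns]
  | succ fuel ih =>
    intro i d h1 h2
    by_cases hlt : i < g.length
    · have hd : g.drop i = g[i] :: g.drop (i + 1) := List.drop_eq_getElem_cons hlt
      have hget : PySem.List.pyGet? g (i : Int) = some g[i] := by
        simp [List.getElem?_eq_getElem hlt]
      have hj : pvInnerA g g[i] i
          = (i : Int) + (((g.drop (i+1)).takeWhile (fun y => y == g[i])).length + 1 : Nat) := by
        rw [pvInnerA_eq g g[i] i, hd,
          List.takeWhile_cons_of_pos (p := fun y => y == g[i]) (by simp)]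
        simp [List.length_cons]
      rw [pvOuterA, if_pos (by simp only [PySem.List.len_eq]; exact_mod_cast hlt), hget]
      dsimp only
      set t := ((g.drop (i+1)).takeWhile (fun y => y == g[i])).length with ht
      have htle : t ≤ g.length - (i+1) := by
        have hsub := (List.takeWhile_sublist (l := g.drop (i+1)) (fun y => y == g[i])).length_le
        simp only [List.length_drop] at hsub
        omega
      rw [hj, hd, pvRuns]
      rw [← ht, List.drop_drop]
      have hcast : (i : Int) + ((t + 1 : Nat) : Int) = ((i + t + 1 : Nat) : Int) := by
        push_cast; ring
      have hcast2 : (i : Int) + ((t : Nat) : Int) + 1 = ((i + t + 1 : Nat) : Int) := by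
        push_cast; ring
      rw [hcast, hcast2, show i + 1 + t = i + t + 1 by ring, List.foldl_cons]
      exact ih (i + t + 1) _ (by omega) (by omega)
    · have hi : i = g.length := by omega
      subst hi
      rw [pvOuterA, if_neg (by simp)]
      simp [List.drop_length, pvRuns]

lemma pyRange_one_shift (a b c : Int) :
    PySem.List.pyRange (a + c) (b + c) 1 = (PySem.List.pyRange a b 1).map (fun s => s + c) := by
  rw [PySem.List.pyRange_one, PySem.List.pyRange_one, List.map_map,
    show b + c - (a + c) = b - a by ring]
  apply List.map_congr_left
  intro j _
  simp only [Function.comp_apply]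
  ring

lemma starts_decomp (x : String) (xs : List String)
    (hk : (xs.takeWhile (fun y => y == x)).length + 1 < (x :: xs).length) :
    pvStarts (x :: xs) =
      0 :: (pvStarts ((x :: xs).drop ((xs.takeWhile (fun y => y == x)).length + 1))).map
        (fun s => s + (((xs.takeWhile (fun y => y == x)).length : Int) + 1)) := by
  set p : String → Bool := fun y => y == x with hp
  set t := (xs.takeWhile p).length with htdef
  have htlt : t < xs.length := by simp only [List.length_cons] at hk; omega
  -- every index below t+1 holds x
  have hall : ∀ j : Nat, j < t + 1 → (x :: xs)[j]? = some x := by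
    intro j hj
    match j with
    | 0 => simp
    | Nat.succ m =>
      have hm : m < t := by omega
      have hmx : xs[m]'(by omega) = x := by
        have hpre := (List.takeWhile_prefix (l := xs) p).getElem (i := m) (by omega)
        have hmem : (xs.takeWhile p)[m]'(by omega) ∈ xs.takeWhile p := List.getElem_mem _
        have hbeq := List.mem_takeWhile_imp hmem
        rw [hpre] at hbeq
        simp [hp] at hbeq; simpa using hbeq
      simp [List.getElem?_eq_getElem (by omega : m < xs.length), hmx]
  -- the element at index t+1 starts a new run
  have hdw : xs.dropWhile p = xs.drop t := by
    conv_rhs => rw [← List.takeWhile_append_dropWhile (p := p) (l := xs)]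
    rw [htdef, List.drop_left]
  have hyget : xs[t]? = some (xs[t]'htlt) := List.getElem?_eq_getElem htlt
  have hpy : p (xs[t]'htlt) = false := by
    have hh := List.head?_dropWhile_not p xs
    rw [hdw, List.head?_drop, hyget] at hh
    simpa using hh
  have hyx : xs[t]'htlt ≠ x := by simpa [hp] using hpy
  have hky : (x :: xs)[t + 1]? = some (xs[t]'htlt) := by
    simpa using hyget
  have hdropl : (x :: xs).drop (t + 1) = xs.drop t := by simp
  -- now compute the filtered range
  unfold pvStarts
  congr 1
  simp only [PySem.List.len_eq, List.length_cons, List.length_drop, hdropl]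
  push_cast
  rw [Nat.cast_sub htlt.le]
  rw [PySem.List.pyRange_one_append 1 ((t : Int) + 1) ((xs.length : Int) + 1) (by omega)
    (by have : (t : Int) < xs.length := by exact_mod_cast htlt
        omega),
    List.filter_append]
  have h1 : List.filter
      (fun i => PySem.List.pyGet? (x :: xs) i != PySem.List.pyGet? (x :: xs) (i - 1))
      (PySem.List.pyRange 1 ((t : Int) + 1) 1) = [] := by
    apply List.filter_eq_nil_iff.mpr
    intro a ha
    rw [PySem.List.mem_pyRange_one] at ha
    rw [PySem.List.pyGet?_of_nonneg _ (by omega : (0:Int) ≤ a),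
      PySem.List.pyGet?_of_nonneg _ (by omega : (0:Int) ≤ a - 1)]
    have hc1 : (x :: xs)[a.toNat]? = some x := hall a.toNat (by omega)
    have hc2 : (x :: xs)[(a - 1).toNat]? = some x := hall (a - 1).toNat (by omega)
    rw [hc1, hc2]
    simp
  rw [h1, List.nil_append]
  have htlt' : (t : Int) < (xs.length : Int) := by exact_mod_cast htlt
  rw [PySem.List.pyRange_one_cons (by omega : (t : Int) + 1 < (xs.length : Int) + 1)]
  rw [List.filter_cons_of_pos (by
    rw [PySem.List.pyGet?_of_nonneg _ (by omega : (0:Int) ≤ (t : Int) + 1),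
      PySem.List.pyGet?_of_nonneg _ (by omega : (0:Int) ≤ (t : Int) + 1 - 1)]
    have e1 : ((t : Int) + 1).toNat = t + 1 := by omega
    have e2 : ((t : Int) + 1 - 1).toNat = t := by omega
    rw [e1, e2, hky, hall t (by omega)]
    simpa using hyx)]
  rw [List.map_cons]
  congr 1
  · omega
  · rw [show (t : Int) + 1 + 1 = 1 + ((t : Int) + 1) by ring,
      show (xs.length : Int) + 1 = ((xs.length : Int) - (t : Int)) + ((t : Int) + 1) by ring,
      pyRange_one_shift, List.filter_map]
    congr 1
    apply List.filter_congr
    intro i hi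
    rw [PySem.List.mem_pyRange_one] at hi
    have hg1 : PySem.List.pyGet? (List.drop t xs) i
        = PySem.List.pyGet? (x :: xs) (i + ((t : Int) + 1)) := by
      rw [← hdropl, pyGet?_drop _ (t + 1) i (by omega)]
      push_cast
      ring_nf
    have hg2 : PySem.List.pyGet? (List.drop t xs) (i - 1)
        = PySem.List.pyGet? (x :: xs) (i - 1 + ((t : Int) + 1)) := by
      rw [← hdropl, pyGet?_drop _ (t + 1) (i - 1) (by omega)]
      push_cast
      ring_nf
    simp only [Function.comp_apply, hg1, hg2]
    rw [show i + ((t : Int) + 1) - 1 = i - 1 + ((t : Int) + 1) by ring]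

lemma zip_shift (F : List Int) (c L : Int) :
    ((0 :: (0 :: F).map (fun s => s + c)).zip
      ((PySem.List.slice (0 :: (0 :: F).map (fun s => s + c)) (some 1) none) ++ [L + c]))
    = (0, c) :: ((0 :: F).zip ((PySem.List.slice (0 :: F) (some 1) none) ++ [L])).map
        (fun se => (se.1 + c, se.2 + c)) := by
  rw [PySem.List.slice_from_one, PySem.List.slice_from_one]
  simp only [List.map_cons, List.tail_cons, List.cons_append, List.zip_cons_cons, zero_add]
  congr 1
  rw [show (fun se : Int × Int => (se.1 + c, se.2 + c))
      = Prod.map (fun s => s + c) (fun s => s + c) from rfl, ← List.zip_map]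
  simp [List.map_append]

-- inside the first run (indices 0 … takeWhile-length) every element is the run's head
lemma run_all (z : String) (zs : List String) (j : Nat)
    (hj : j < (zs.takeWhile (fun y => y == z)).length + 1) : (z :: zs)[j]? = some z := by
  match j with
  | 0 => simp
  | Nat.succ m =>
    have hm : m < (zs.takeWhile (fun y => y == z)).length := by omega
    have hmzs : m < zs.length := by
      have := (List.takeWhile_sublist (l := zs) (fun y => y == z)).length_le
      omega
    have hmx : zs[m]'hmzs = z := by
      have hpre := (List.takeWhile_prefix (l := zs) (fun y => y == z)).getElem (i := m) hm
      have hmem : (zs.takeWhile (fun y => y == z))[m]'hm ∈ zs.takeWhile (fun y => y == z) :=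
        List.getElem_mem _
      have hbeq := List.mem_takeWhile_imp hmem
      rw [hpre] at hbeq
      simpa using hbeq
    simp [List.getElem?_eq_getElem hmzs, hmx]

lemma B_main (g : List String) (off : Nat) (d : PySem.Dict String (Int × Int))
    (hoff : off ≤ g.length) :
    ((pvZipB (g.drop off)).map (fun se => (se.1 + (off : Int), se.2 + (off : Int)))).foldl (pvStepB g) d
      = (pvRuns (g.drop off) off).foldl pvIns d := by
  cases hl : g.drop off with
  | nil =>
    have hoffe : off = g.length := by
      have := List.drop_eq_nil_iff.mp hl
      omega
    have hnone : PySem.List.pyGet? g (off : Int) = none := by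
      rw [PySem.List.pyGet?_of_nonneg _ (by omega : (0:Int) ≤ (off:Int))]
      simp
      omega
    simp [pvZipB, pvStarts, pvRuns, PySem.List.len_eq, PySem.List.pyRange_one_eq_nil,
      PySem.List.slice_from_one, pvStepB, hnone]
  | cons z zs =>
    have hlen : (g.drop off).length = g.length - off := List.length_drop ..
    rw [hl] at hlen
    have hz : PySem.List.pyGet? g (off : Int) = some z := by
      rw [PySem.List.pyGet?_of_nonneg _ (by omega : (0:Int) ≤ (off:Int))]
      have h0 : (g.drop off)[0]? = g[off + 0]? := List.getElem?_drop
      rw [hl] at h0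
      simpa using h0.symm
    have htz : (zs.takeWhile (fun y => y == z)).length ≤ zs.length :=
      (List.takeWhile_sublist (l := zs) (fun y => y == z)).length_le
    by_cases hsolo : (zs.takeWhile (fun y => y == z)).length = zs.length
    · -- the whole suffix is a single run
      have hst : pvStarts (z :: zs) = [0] := by
        unfold pvStarts
        rw [List.cons_eq_cons]
        refine ⟨rfl, List.filter_eq_nil_iff.mpr ?_⟩
        intro a ha
        rw [PySem.List.mem_pyRange_one] at ha
        simp only [PySem.List.len_eq, List.length_cons] at ha
        rw [PySem.List.pyGet?_of_nonneg _ (by omega : (0:Int) ≤ a),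
          PySem.List.pyGet?_of_nonneg _ (by omega : (0:Int) ≤ a - 1),
          run_all z zs a.toNat (by omega), run_all z zs (a - 1).toNat (by omega)]
        simp
      have hdz : zs.drop (zs.takeWhile (fun y => y == z)).length = [] := by
        rw [hsolo, List.drop_length]
      rw [pvRuns, hdz, pvRuns]
      unfold pvZipB
      rw [hst]
      rw [show PySem.List.slice [(0:Int)] (some 1) none = [] from rfl]
      simp only [List.nil_append, List.zip_cons_cons, List.zip_nil_right, List.map_cons,
        List.map_nil, List.foldl_cons, List.foldl_nil]
      unfold pvStepB pvIns
      simp only [PySem.List.len_eq, List.length_cons]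
      rw [show ((0:Int) + (off:Int)) = (off:Int) by ring, hz]
      rw [hsolo]
      dsimp only
      congr 2
      push_cast
      ring
    · -- the first run is a proper prefix of the suffix
      set t := (zs.takeWhile (fun y => y == z)).length with ht
      have htlt : t < zs.length := by omega
      have hsd := starts_decomp z zs (by simp only [List.length_cons]; omega)
      have hds : (z :: zs).drop (t + 1) = zs.drop t := by simp
      rw [hds] at hsd
      have hzip : pvZipB (z :: zs)
          = (0, (t : Int) + 1) :: (pvZipB (zs.drop t)).map
              (fun se => (se.1 + ((t : Int) + 1), se.2 + ((t : Int) + 1))) := by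
        unfold pvZipB
        obtain ⟨F, hF⟩ : ∃ F, pvStarts (zs.drop t) = 0 :: F := ⟨_, rfl⟩
        have hL : PySem.List.len (z :: zs) = PySem.List.len (zs.drop t) + ((t : Int) + 1) := by
          simp only [PySem.List.len_eq, List.length_cons, List.length_drop]
          omega
        rw [hsd, hF, hL]
        exact zip_shift F ((t : Int) + 1) (PySem.List.len (zs.drop t))
      rw [hzip]
      simp only [List.map_cons, List.map_map, List.foldl_cons]
      have hstep : pvStepB g d ((0 : Int) + (off : Int), ((t : Int) + 1) + (off : Int))
          = d.insert z ((off : Int), (off : Int) + (t : Int) + 1) := by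
        unfold pvStepB
        rw [show ((0 : Int) + (off : Int)) = (off : Int) by ring]
        rw [hz]
        dsimp only
        congr 2
        ring
      have hmm : ((fun se : Int × Int => (se.1 + (off : Int), se.2 + (off : Int)))
            ∘ (fun se : Int × Int => (se.1 + ((t : Int) + 1), se.2 + ((t : Int) + 1))))
          = (fun se : Int × Int => (se.1 + ((off + (t + 1) : Nat) : Int),
              se.2 + ((off + (t + 1) : Nat) : Int))) := by
        funext se
        simp only [Function.comp_apply, Prod.mk.injEq]
        push_cast
        constructor <;> ring
      rw [hstep, hmm]
      have hgd : g.drop (off + (t + 1)) = zs.drop t := by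
        rw [← List.drop_drop (i := t + 1) (j := off), hl]
        simp
      have hrec := B_main g (off + (t + 1)) (d.insert z ((off : Int), (off : Int) + (t : Int) + 1))
        (by simp only [List.length_cons] at hlen; omega)
      rw [hgd] at hrec
      rw [hrec]
      rw [pvRuns]
      rw [← ht, List.foldl_cons]
      rw [show ((off + (t + 1) : Nat) : Int) = (off : Int) + (t : Int) + 1 by push_cast; ring]
      rfl
termination_by g.length - off
decreasing_by
  have hlc := congrArg List.length hl
  simp only [List.length_drop, List.length_cons] at hlc
  omega

-- ===== VERDICT (by name: the statement is the Claim_ definition above) =====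
theorem get_chromosome_coords_spec : Claim_equal_get_chromosome_coords := by
  intro g _
  unfold Spec_get_chromosome_coords
  have hA : get_chromosome_coords g = ((pvRuns g 0).foldl pvIns PySem.Dict.empty).items := by
    unfold get_chromosome_coords
    have h0 := pvOuterA_eq g g.length 0 PySem.Dict.empty (by omega) (by omega)
    simp only [Nat.cast_zero, List.drop_zero] at h0
    rw [h0]
  have hB := B_main g 0 PySem.Dict.empty (by omega)
  simp at hB
  rw [hA, alt_eq_fold g, ← hB]
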